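-- pv_equiv track=rewrite | github.com/gscept/nebula | fips-files/generators/sjson/__init__.py | _escape_string
-- ===== SOURCE A (Python) =====
-- import string
--
-- _IDENTIFIER_SET = set(string.ascii_letters + string.digits + '_')
--
-- _ESCAPE_CHARACTER_SET = {'\n': '\\n', '\b': '\\b', '\t': '\\t', '\"': '\\"'}
--
-- def _escape_string(obj, quote=True):
--     """Escape a string.
--
--     If quote is set, the string will be returned with quotation marks at the
--     beginning and end. If quote is set to false, quotation marks will be only
--     added if needed(that is, if the string is not an identifier.)"""
--     if any([c not in _IDENTIFIER_SET for c in obj]):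
--         # String must be quoted, even if quote was not requested
--         quote = True
--
--     if quote:
--         yield '"'
--
--     for key, value in _ESCAPE_CHARACTER_SET.items():
--         obj = obj.replace(key, value)
--
--     yield obj
--
--     if quote:
--         yield '"'
-- ===== SOURCE B (Python) =====
-- import string
--
-- _IDENTIFIER_SET = set(string.ascii_letters + string.digits + '_')
--
-- _ESCAPE_CHARACTER_SET = {'\n': '\\n', '\b': '\\b', '\t': '\\t', '\"': '\\"'}
--
--
-- def _escape_string(obj, quote=True):
--     """Escape a string in one pass over its characters.
--
--     Same contract as the original: yields the optionally-quoted, escaped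
--     pieces; quoting is forced when the string is not an identifier."""
--     buf = []
--     needs_quote = False
--     for c in obj:
--         buf.append(_ESCAPE_CHARACTER_SET.get(c, c))
--         if c not in _IDENTIFIER_SET:
--             needs_quote = True
--     if quote or needs_quote:
--         yield '"'
--         yield ''.join(buf)
--         yield '"'
--     else:
--         yield ''.join(buf)
-- ===== Notes on version B (the rewrite author's own statement) =====
-- stated objective: alternative
-- what changed: Replaces the separate any(...) identifier scan plus four sequential str.replace passes with a single character-by-character pass that builds the escaped buffer and the needs-quote flag together.
import Mathlib
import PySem

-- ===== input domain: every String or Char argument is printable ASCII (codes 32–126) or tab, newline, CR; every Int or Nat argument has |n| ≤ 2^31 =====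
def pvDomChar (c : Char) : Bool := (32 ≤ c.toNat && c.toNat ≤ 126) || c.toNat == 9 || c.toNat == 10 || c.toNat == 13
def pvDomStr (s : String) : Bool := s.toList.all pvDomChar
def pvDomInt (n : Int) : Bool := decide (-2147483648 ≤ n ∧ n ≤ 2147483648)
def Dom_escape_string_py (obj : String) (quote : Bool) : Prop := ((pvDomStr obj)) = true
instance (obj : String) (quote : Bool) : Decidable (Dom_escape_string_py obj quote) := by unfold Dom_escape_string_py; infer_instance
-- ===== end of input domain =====

-- B is a single pass over the characters instead of an any(...) scan plus four sequential replace passes; same yielded pieces.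

-- module constant _IDENTIFIER_SET = set(ascii_letters + digits + '_')
def pvIdentifierSet : PySem.Set Char :=
  PySem.Set.ofList ("abcdefghijklmnopqrstuvwxyzABCDEFGHIJKLMNOPQRSTUVWXYZ0123456789_".toList)

-- module constant _ESCAPE_CHARACTER_SET (insertion order preserved)
def pvEscapeDict : PySem.Dict Char String :=
  PySem.Dict.ofList [('\n', "\\n"), ('\x08', "\\b"), ('\t', "\\t"), ('\"', "\\\"")]

-- ===== PORT A =====
def escape_string_py (obj : String) (quote : Bool) : List String :=
  -- if any([c not in _IDENTIFIER_SET for c in obj]): quote = True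
  let quote := if (obj.toList.map (fun c => !(pvIdentifierSet.contains c))).any id then true else quote
  -- for key, value in _ESCAPE_CHARACTER_SET.items(): obj = obj.replace(key, value)
  let obj := pvEscapeDict.items.foldl (fun o kv => PySem.Str.replace o (String.ofList [kv.1]) kv.2) obj
  (if quote then ["\""] else []) ++ [obj] ++ (if quote then ["\""] else [])

-- ===== PORT B =====
-- _ESCAPE_CHARACTER_SET.get(c, c) of Source B
def pvEscGet (c : Char) : String :=
  (PySem.Dict.get? pvEscapeDict c).getD (String.ofList [c])

def escape_string_py_alt (obj : String) (quote : Bool) : List String :=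
  let st := obj.toList.foldl
    (fun (st : List String × Bool) c =>
      (st.1 ++ [pvEscGet c], st.2 || !(pvIdentifierSet.contains c)))
    ([], false)
  if quote || st.2 then ["\"", PySem.Str.join "" st.1, "\""]
  else [PySem.Str.join "" st.1]

-- ===== PRECONDITION & SPEC =====
def Spec_escape_string_py (obj : String) (quote : Bool) (out : List String) : Prop := out = escape_string_py_alt obj quote
instance (obj : String) (quote : Bool) (out : List String) : Decidable (Spec_escape_string_py obj quote out) := by unfold Spec_escape_string_py; infer_instance

-- ===== CLAIM (what is proved, stated in full; the proofs are below) =====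
def Claim_equal_escape_string_py : Prop := ∀ (obj : String) (quote : Bool), Dom_escape_string_py obj quote → Spec_escape_string_py obj quote (escape_string_py obj quote)

-- ===== LEMMAS AND PROOFS =====

-- single-character escape on the list side
def pvEsc (c : Char) : List Char :=
  if c = '\n' then ['\\', 'n']
  else if c = '\x08' then ['\\', 'b']
  else if c = '\t' then ['\\', 't']
  else if c = '\"' then ['\\', '\"'] else [c]

-- str.replace with a single-character pattern is a flatMap
theorem replace_go_single (k : Char) (v : List Char) :
    ∀ (fuel : Nat) (l acc : List Char), l.length ≤ fuel →
      PySem.Chars.replace.go [k] v fuel l acc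
        = acc.reverse ++ l.flatMap (fun c => if c = k then v else [c]) := by
  intro fuel
  induction fuel with
  | zero =>
    intro l acc h
    cases l with
    | nil => simp [PySem.Chars.replace.go]
    | cons c t => simp at h
  | succ n ih =>
    intro l acc h
    cases l with
    | nil => simp [PySem.Chars.replace.go]
    | cons c t =>
      by_cases hc : c = k
      · subst hc
        have hp : [c].isPrefixOf (c :: t) = true := by simp [List.isPrefixOf]
        simp only [PySem.Chars.replace.go, hp, if_pos, List.length_cons, List.length_nil,
          Nat.zero_add, List.drop_succ_cons, List.drop_zero]
        rw [ih t (v.reverse ++ acc) (by simpa using Nat.le_of_succ_le_succ h)]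
        simp
      · have hp : [k].isPrefixOf (c :: t) = false := by
          simp [List.isPrefixOf]
          exact fun h' => hc h'.symm
        simp only [PySem.Chars.replace.go, hp, Bool.false_eq_true, if_false]
        rw [ih t (c :: acc) (by simpa using Nat.le_of_succ_le_succ h)]
        simp [hc]

theorem replace_single (k : Char) (v l : List Char) :
    PySem.Chars.replace l [k] v = l.flatMap (fun c => if c = k then v else [c]) := by
  simp [PySem.Chars.replace, replace_go_single k v l.length l [] le_rfl]

-- the four sequential replace passes collapse to one flatMap of pvEsc
theorem chain_eq_flatMap (l : List Char) :
    PySem.Chars.replace (PySem.Chars.replace (PySem.Chars.replace (PySem.Chars.replace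
      l ['\n'] "\\n".toList) ['\x08'] "\\b".toList) ['\t'] "\\t".toList) ['\"'] "\\\"".toList
    = l.flatMap pvEsc := by
  induction l with
  | nil => simp [replace_single]
  | cons c t ih =>
    simp only [replace_single] at ih ⊢
    simp only [List.flatMap_cons, List.flatMap_append]
    rw [ih]
    congr 1
    by_cases h1 : c = '\n'
    · subst h1; decide
    · by_cases h2 : c = '\x08'
      · subst h2; decide
      · by_cases h3 : c = '\t'
        · subst h3; decide
        · by_cases h4 : c = '\"'
          · subst h4; decide
          · simp [pvEsc, h1, h2, h3, h4]

-- B's single fold computes the escaped pieces and the any-flag together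
theorem foldl_pair (l : List Char) (b : List String) (q : Bool) :
    l.foldl (fun (st : List String × Bool) c =>
        (st.1 ++ [pvEscGet c], st.2 || !(pvIdentifierSet.contains c))) (b, q)
      = (b ++ l.map pvEscGet, q || l.any (fun c => !(pvIdentifierSet.contains c))) := by
  induction l generalizing b q with
  | nil => simp
  | cons c t ih =>
    simp only [List.foldl_cons]
    rw [ih]
    simp [Bool.or_assoc]

theorem escGet_toList (c : Char) : (pvEscGet c).toList = pvEsc c := by
  by_cases h1 : c = '\n'
  · subst h1; decide
  · by_cases h2 : c = '\x08'
    · subst h2; decide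
    · by_cases h3 : c = '\t'
      · subst h3; decide
      · by_cases h4 : c = '\"'
        · subst h4; decide
        · have hn : PySem.Dict.get? pvEscapeDict c = none := by
            simp [pvEscapeDict, PySem.Dict.ofList, PySem.Dict.get?, PySem.Dict.update,
              PySem.Dict.insert, PySem.Dict.empty]
            exact ⟨Ne.symm h1, Ne.symm h2, Ne.symm h3, Ne.symm h4⟩
          simp [pvEscGet, pvEsc, hn, h1, h2, h3, h4]

theorem join_nil_flatten (parts : List (List Char)) :
    PySem.Chars.join [] parts = parts.flatten := by
  induction parts with
  | nil => simp [PySem.Chars.join_nil]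
  | cons a t ih =>
    cases t with
    | nil => simp [PySem.Chars.join_singleton]
    | cons b u => simp [PySem.Chars.join_cons_cons, ih]

-- B's joined buffer equals A's replace-chained string
theorem joined_eq (l : List Char) :
    PySem.Str.join "" (l.map pvEscGet) = String.ofList (l.flatMap pvEsc) := by
  apply String.toList_inj.mp
  rw [PySem.Str.toList_join, String.toList_ofList]
  have : (l.map pvEscGet).map String.toList = l.map pvEsc := by
    simp [List.map_map, Function.comp, escGet_toList]
  simp only [this]
  rw [join_nil_flatten]
  simp [List.flatMap_def]

theorem any_map_id (f : Char → Bool) (l : List Char) : (l.map f).any id = l.any f := by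
  induction l with
  | nil => rfl
  | cons c t ih => simp [ih]

-- ===== VERDICT (by name: the statement is the Claim_ definition above) =====
set_option maxRecDepth 8192 in
theorem escape_string_py_spec : Claim_equal_escape_string_py := by
  intro obj quote _
  unfold Spec_escape_string_py escape_string_py escape_string_py_alt
  rw [foldl_pair]
  simp only [List.nil_append]
  have hq : (if (obj.toList.map (fun c => !(pvIdentifierSet.contains c))).any id then true else quote)
      = (quote || obj.toList.any (fun c => !(pvIdentifierSet.contains c))) := by
    rw [any_map_id]
    cases h : obj.toList.any (fun c => !(pvIdentifierSet.contains c)) <;> simp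
  have hs : pvEscapeDict.items.foldl (fun o kv => PySem.Str.replace o (String.ofList [kv.1]) kv.2) obj
      = PySem.Str.join "" (obj.toList.map pvEscGet) := by
    rw [joined_eq]
    apply String.toList_inj.mp
    rw [String.toList_ofList]
    show (PySem.Str.replace (PySem.Str.replace (PySem.Str.replace (PySem.Str.replace
      obj "\n" "\\n") "\x08" "\\b") "\t" "\\t") "\"" "\\\"").toList = _
    simp only [PySem.Str.toList_replace]
    rw [show ("\n" : String).toList = ['\n'] from rfl, show ("\x08" : String).toList = ['\x08'] from rfl,
      show ("\t" : String).toList = ['\t'] from rfl, show ("\"" : String).toList = ['\"'] from rfl]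
    exact chain_eq_flatMap obj.toList
  rw [hq, hs]
  simp only [Bool.false_or]
  cases hqa : (quote || obj.toList.any (fun c => !(pvIdentifierSet.contains c))) <;>
    simp [hqa]
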